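-- pv_equiv track=rewrite | github.com/fgirlanda/AdventOfCode | 2024/day5/day5.py | genera_lista_prio
-- ===== SOURCE A (Python) =====
-- from collections import defaultdict
--
-- def genera_lista_prio(mappa_regole):
--     dizionario_lista_prio = defaultdict(list)
--     indice_max = 0
--     lista_prio = []
--
--     for x,y in mappa_regole:
--         dizionario_lista_prio[x].append(y)
--         indice_max = max(indice_max, x)
--     for i in range(indice_max + 2):
--         if i in dizionario_lista_prio:
--             lista_prio.append(dizionario_lista_prio[i])
--         else:
--             lista_prio.append([])
--
--     return lista_prio
-- ===== SOURCE B (Python) =====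
-- def genera_lista_prio(mappa_regole):
--     top = max((x for x, _ in mappa_regole), default=-1)
--     size = max(top, 0) + 2
--     return [[y for x, y in mappa_regole if x == i] for i in range(size)]
-- ===== Notes on version B (the rewrite author's own statement) =====
-- stated objective: simpler
-- what changed: B drops the defaultdict grouping and membership-checked copy loop: it computes the maximum first-element once and builds the result directly as a comprehension that filters the pairs per index.
import Mathlib
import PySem

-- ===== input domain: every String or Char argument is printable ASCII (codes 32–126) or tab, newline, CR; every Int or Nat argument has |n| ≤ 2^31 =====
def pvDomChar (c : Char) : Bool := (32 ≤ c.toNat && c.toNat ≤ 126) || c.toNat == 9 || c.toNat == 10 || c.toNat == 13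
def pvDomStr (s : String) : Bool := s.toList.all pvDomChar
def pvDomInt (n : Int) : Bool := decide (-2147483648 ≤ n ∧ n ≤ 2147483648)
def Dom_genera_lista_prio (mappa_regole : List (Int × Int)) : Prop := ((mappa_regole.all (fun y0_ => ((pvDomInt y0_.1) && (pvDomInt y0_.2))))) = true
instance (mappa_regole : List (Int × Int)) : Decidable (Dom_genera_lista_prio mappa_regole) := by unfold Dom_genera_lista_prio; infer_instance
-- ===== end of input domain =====

-- B replaces A's defaultdict grouping + membership-checked copy loop by a direct
-- per-index filtering comprehension (simpler; not faster).

-- ===== PORT A =====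
def genera_lista_prio (mappa_regole : List (Int × Int)) : List (List Int) :=
  -- first loop: dizionario_lista_prio[x].append(y); indice_max = max(indice_max, x)
  let st := mappa_regole.foldl
    (fun (st : PySem.Dict Int (List Int) × Int) xy =>
      (st.1.modify xy.1 [] (· ++ [xy.2]), max st.2 xy.1))
    (PySem.Dict.empty, 0)
  -- second loop: for i in range(indice_max + 2)
  (PySem.List.pyRange 0 (st.2 + 2) 1).foldl
    (fun acc i =>
      if st.1.contains i then acc ++ [st.1.getD i []] else acc ++ [[]]) []

-- ===== PORT B =====
def genera_lista_prio_alt (mappa_regole : List (Int × Int)) : List (List Int) :=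
  let top : Int :=
    match mappa_regole.map Prod.fst with
    | [] => -1
    | a :: rest => rest.foldl max a
  let size := max top 0 + 2
  (PySem.List.pyRange 0 size 1).map
    (fun i => (mappa_regole.filter (fun p => p.1 == i)).map Prod.snd)

-- ===== PRECONDITION & SPEC =====
def Spec_genera_lista_prio (mappa_regole : List (Int × Int)) (out : List (List Int)) : Prop := out = genera_lista_prio_alt mappa_regole
instance (mappa_regole : List (Int × Int)) (out : List (List Int)) : Decidable (Spec_genera_lista_prio mappa_regole out) := by unfold Spec_genera_lista_prio; infer_instance

-- ===== CLAIM (what is proved, stated in full; the proofs are below) =====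
def Claim_equal_genera_lista_prio : Prop := ∀ (mappa_regole : List (Int × Int)), Dom_genera_lista_prio mappa_regole → Spec_genera_lista_prio mappa_regole (genera_lista_prio mappa_regole)

-- ===== LEMMAS AND PROOFS =====

-- A's single loop updates the dict and the running max independently: it is a pair of folds
theorem pv_foldl_prod (l : List (Int × Int)) (d : PySem.Dict Int (List Int)) (m : Int) :
    l.foldl (fun (st : PySem.Dict Int (List Int) × Int) xy =>
        (st.1.modify xy.1 [] (· ++ [xy.2]), max st.2 xy.1)) (d, m)
      = (l.foldl (fun d xy => d.modify xy.1 [] (· ++ [xy.2])) d,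
         l.foldl (fun m (xy : Int × Int) => max m xy.1) m) := by
  induction l generalizing d m with
  | nil => rfl
  | cons x t ih => simp [List.foldl, ih]

theorem pv_foldl_max_init (l : List Int) (a b : Int) :
    l.foldl max (max a b) = max a (l.foldl max b) := by
  induction l generalizing b with
  | nil => rfl
  | cons x t ih =>
    simp only [List.foldl]
    rw [max_assoc, ih]

-- A's running max (starting at 0) equals max 0 (B's max-with-default -1)
theorem pv_max_eq (l : List Int) :
    l.foldl max 0 = max (match l with | [] => (-1 : Int) | a :: rest => rest.foldl max a) 0 := by
  cases l with
  | nil => decide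
  | cons x t =>
    simp only [List.foldl]
    rw [pv_foldl_max_init]
    omega

theorem pv_foldl_append (l : List Int) (g : Int → List Int) (init : List (List Int)) :
    l.foldl (fun acc i => acc ++ [g i]) init = init ++ l.map g := by
  induction l generalizing init with
  | nil => simp
  | cons x t ih => simp [List.foldl, ih]

-- ===== VERDICT (by name: the statement is the Claim_ definition above) =====
theorem genera_lista_prio_spec : Claim_equal_genera_lista_prio := by
  intro l _
  unfold Spec_genera_lista_prio
  simp only [genera_lista_prio, genera_lista_prio_alt]
  rw [pv_foldl_prod]
  simp only []
  have hd : ∀ i : Int,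
      (l.foldl (fun d p => d.modify p.1 [] (· ++ [p.2])) PySem.Dict.empty).getD i []
        = (l.filter (fun p => p.1 == i)).map (·.2) := by
    intro i
    rw [PySem.Dict.getD_foldl_modify_append]
    simp
  have hbranch : ∀ acc i,
      (if (l.foldl (fun d p => d.modify p.1 [] (· ++ [p.2])) PySem.Dict.empty).contains i
        then acc ++ [(l.foldl (fun d p => d.modify p.1 [] (· ++ [p.2])) PySem.Dict.empty).getD i []]
        else acc ++ [([] : List Int)])
      = acc ++ [(l.filter (fun p => p.1 == i)).map (·.2)] := by
    intro acc i
    by_cases hc : (l.foldl (fun d p => d.modify p.1 [] (· ++ [p.2])) PySem.Dict.empty).contains i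
    · simp [hc, hd i]
    · have hc' : (l.foldl (fun d p => d.modify p.1 [] (· ++ [p.2])) PySem.Dict.empty).contains i = false := by
        simpa using hc
      rw [if_neg (by simp [hc']), ← hd i,
        PySem.Dict.getD_of_not_contains _ _ hc']
  simp only [hbranch]
  rw [pv_foldl_append]
  have hm : l.foldl (fun m (p : Int × Int) => max m p.1) 0
      = (l.map Prod.fst).foldl max 0 := by
    rw [List.foldl_map]
  rw [hm, pv_max_eq (l.map Prod.fst)]
  simp
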